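-- pv_equiv track=rewrite | github.com/chris-henry-holland/python-ProjectEulerSolutions | venv/lib/python3.11/site-packages/data_structures/suffix_array.py | buildLSArrayAndLMS
-- ===== SOURCE A (Python) =====
-- from typing import (
--     Dict,
--     List,
--     Tuple,
--     Union,
-- )
--
-- def buildLSArrayAndLMS(
--
--     nums: List[int],
-- ) -> Tuple[Union[List[bool], List[int]]]:
--     n = len(nums)
--     arr = [True] * (n + 1)
--     lms = []
--     num1 = 0
--     for i in reversed(range(n)):
--         num1, num2 = nums[i], num1
--         if num1 > num2 or (num1 == num2 and not arr[i + 1]):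
--             arr[i] = False
--             if arr[i + 1]: lms.append(i + 1)
--     return (arr, lms[::-1])
-- ===== SOURCE B (Python) =====
-- def buildLSArrayAndLMS(nums):
--     n = len(nums)
--     arr = [True] * (n + 1)
--     for i in range(n - 1, -1, -1):
--         nxt = nums[i + 1] if i + 1 < n else 0
--         if nums[i] > nxt or (nums[i] == nxt and not arr[i + 1]):
--             arr[i] = False
--     lms = [i for i in range(1, n + 1) if arr[i] and not arr[i - 1]]
--     return (arr, lms)
-- ===== Notes on version B (the rewrite author's own statement) =====
-- stated objective: simpler
-- what changed: Replaces A's single fused reverse loop (carried previous value, conditional append into a list that must be reversed at the end) by two independent passes: a reverse pass computing only the S/L-type array from nums[i+1] directly, then a forward comprehension collecting LMS positions already in ascending order, so no carried state and no final reversal.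
import Mathlib
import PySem

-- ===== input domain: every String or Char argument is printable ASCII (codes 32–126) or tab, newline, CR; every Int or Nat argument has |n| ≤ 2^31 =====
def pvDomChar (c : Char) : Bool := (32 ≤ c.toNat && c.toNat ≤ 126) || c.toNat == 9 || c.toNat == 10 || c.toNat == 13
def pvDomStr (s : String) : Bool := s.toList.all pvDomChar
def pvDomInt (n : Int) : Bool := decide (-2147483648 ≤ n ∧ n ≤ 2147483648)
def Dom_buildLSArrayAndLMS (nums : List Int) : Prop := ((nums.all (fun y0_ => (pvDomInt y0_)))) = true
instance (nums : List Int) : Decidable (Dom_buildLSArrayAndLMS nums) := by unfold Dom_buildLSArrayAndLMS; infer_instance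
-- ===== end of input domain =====

-- B replaces A's fused reverse loop (carried value, append + final reversal) by two
-- independent passes: a reverse pass building only the type array, then a forward
-- scan collecting LMS positions already in ascending order (objective: simpler).

-- ===== PORT A =====
-- the reversed(range(n)) loop of A as a countdown recursion over the same state
def loopA (nums : List Int) : Nat → Int → List Bool → List Int → List Bool × List Int
  | 0, _, arr, lms => (arr, lms.reverse)
  | i+1, num1, arr, lms =>
    let num2 := num1
    let x := nums.getD i 0          -- nums[i], i is in range here
    if x > num2 ∨ (x = num2 ∧ arr.getD (i+1) false = false) then
      loopA nums i x (arr.set i false)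
        (if arr.getD (i+1) false then lms ++ [Int.ofNat (i+1)] else lms)
    else
      loopA nums i x arr lms

def buildLSArrayAndLMS (nums : List Int) : List Bool × List Int :=
  loopA nums nums.length 0 (List.replicate (nums.length + 1) true) []

-- ===== PORT B =====
-- B's reverse pass over arr, as structural recursion on the suffix of nums
def bArr : List Int → List Bool
  | [] => [true]
  | x :: rest =>
    let tail := bArr rest
    let nxt : Int := match rest with | [] => 0 | y :: _ => y
    (if x > nxt ∨ (x = nxt ∧ tail.headD true = false) then false else true) :: tail

def buildLSArrayAndLMS_alt (nums : List Int) : List Bool × List Int :=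
  let arr := bArr nums
  let lms := ((List.range' 1 nums.length).filter
      (fun j => arr.getD j false && !(arr.getD (j-1) false))).map Int.ofNat
  (arr, lms)

-- ===== PRECONDITION & SPEC =====
def Spec_buildLSArrayAndLMS (nums : List Int) (out : List Bool × List Int) : Prop := out = buildLSArrayAndLMS_alt nums
instance (nums : List Int) (out : List Bool × List Int) : Decidable (Spec_buildLSArrayAndLMS nums out) := by unfold Spec_buildLSArrayAndLMS; infer_instance

-- ===== CLAIM (what is proved, stated in full; the proofs are below) =====
def Claim_equal_buildLSArrayAndLMS : Prop := ∀ (nums : List Int), Dom_buildLSArrayAndLMS nums → Spec_buildLSArrayAndLMS nums (buildLSArrayAndLMS nums)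

-- ===== LEMMAS AND PROOFS =====

theorem bArr_ne_nil (l : List Int) : bArr l ≠ [] := by
  cases l <;> simp [bArr]

theorem bArr_drop (l : List Int) : ∀ (i : Nat), i ≤ l.length →
    (bArr l).drop i = bArr (l.drop i) := by
  induction l with
  | nil =>
    intro i hi
    have : i = 0 := Nat.le_zero.mp (by simpa using hi)
    subst this; simp
  | cons x rest ih =>
    intro i hi
    cases i with
    | zero => simp
    | succ j =>
      simp only [List.length_cons, Nat.succ_le_succ_iff] at hi
      simp [bArr, ih j hi]

theorem getD_drop' {α : Type} (l : List α) : ∀ (i k : Nat) (d : α),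
    (l.drop i).getD k d = l.getD (i+k) d := by
  induction l with
  | nil => intro i k d; simp
  | cons x rest ih =>
    intro i k d
    cases i with
    | zero => simp
    | succ j =>
      have : j + 1 + k = (j + k) + 1 := by omega
      simp [this]

theorem getD_replicate_append {α : Type} (b : α) (L : List α) : ∀ (m : Nat) (d : α),
    (List.replicate m b ++ L).getD m d = L.headD d := by
  intro m
  induction m with
  | zero => intro d; cases L <;> simp
  | succ j ih => intro d; simpa [List.replicate_succ] using ih d

theorem set_replicate_append (T : List Bool) : ∀ (i : Nat),
    (List.replicate (i+1) true ++ T).set i false = List.replicate i true ++ false :: T := by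
  intro i
  induction i with
  | zero => simp
  | succ j ih =>
    rw [List.replicate_succ]
    simpa [List.replicate_succ] using congrArg (List.cons true) ih

-- the LMS predicate of B's forward scan
def lmsP (nums : List Int) (j : Nat) : Bool :=
  (bArr nums).getD j false && !((bArr nums).getD (j-1) false)

theorem loopA_inv (nums : List Int) : ∀ (i : Nat), i ≤ nums.length →
    loopA nums i (nums.getD i 0) (List.replicate i true ++ bArr (nums.drop i))
      ((((List.range' (i+1) (nums.length - i)).filter (lmsP nums)).reverse).map Int.ofNat)
    = (bArr nums,
       ((List.range' 1 nums.length).filter (lmsP nums)).map Int.ofNat) := by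
  intro i
  induction i with
  | zero =>
    intro _
    simp only [loopA, Nat.sub_zero, List.drop_zero, List.replicate_zero, List.nil_append,
      Nat.zero_add, List.map_reverse, List.reverse_reverse]
  | succ i ih =>
    intro hi
    have hilt : i < nums.length := hi
    have hdrop : nums.drop i = nums.getD i 0 :: nums.drop (i+1) := by
      rw [List.getD_eq_getElem _ _ hilt]
      exact List.drop_eq_getElem_cons hilt
    have hnxt : (match nums.drop (i+1) with | [] => (0:Int) | y :: _ => y)
        = nums.getD (i+1) 0 := by
      rcases h : nums.drop (i+1) with _ | ⟨y, rest⟩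
      · have hlen := congrArg List.length h
        simp only [List.length_drop, List.length_nil] at hlen
        rw [List.getD_eq_default _ _ (by omega : nums.length ≤ i + 1)]
      · have hlen := congrArg List.length h
        simp only [List.length_drop, List.length_cons] at hlen
        have h1 : i + 1 < nums.length := by omega
        have h2 := List.drop_eq_getElem_cons (l := nums) h1
        rw [h] at h2
        injection h2 with h3 _
        rw [List.getD_eq_getElem _ _ h1]
        exact h3
    obtain ⟨hv, T', hTv⟩ : ∃ hv T', bArr (nums.drop (i+1)) = hv :: T' := by
      rcases hTe : bArr (nums.drop (i+1)) with _ | ⟨a, b⟩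
      · exact absurd hTe (bArr_ne_nil _)
      · exact ⟨a, b, rfl⟩
    have hbds : bArr (nums.drop i)
        = (if nums.getD i 0 > nums.getD (i+1) 0
              ∨ (nums.getD i 0 = nums.getD (i+1) 0 ∧ hv = false)
           then false else true) :: hv :: T' := by
      rw [hdrop]
      simp only [bArr, hnxt, hTv, List.headD_cons]
    have harr1 : (List.replicate (i+1) true ++ (hv :: T')).getD (i+1) false = hv := by
      rw [getD_replicate_append]; rfl
    have hFi : (bArr nums).getD i false
        = (if nums.getD i 0 > nums.getD (i+1) 0
              ∨ (nums.getD i 0 = nums.getD (i+1) 0 ∧ hv = false)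
           then false else true) := by
      have h1 := getD_drop' (bArr nums) i 0 false
      rw [bArr_drop nums i (le_of_lt hilt)] at h1
      simp only [Nat.add_zero] at h1
      rw [← h1, hbds]; rfl
    have hFi1 : (bArr nums).getD (i+1) false = hv := by
      have h1 := getD_drop' (bArr nums) (i+1) 0 false
      rw [bArr_drop nums (i+1) hi] at h1
      simp only [Nat.add_zero] at h1
      rw [← h1, hTv]; rfl
    have hp : lmsP nums (i+1)
        = (hv && !(if nums.getD i 0 > nums.getD (i+1) 0
              ∨ (nums.getD i 0 = nums.getD (i+1) 0 ∧ hv = false)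
           then false else true)) := by
      have : i + 1 - 1 = i := by omega
      rw [lmsP, this, hFi, hFi1]
    have hrange : List.range' (i+1) (nums.length - i)
        = (i+1) :: List.range' (i+2) (nums.length - (i+1)) := by
      have h2 : nums.length - i = (nums.length - (i+1)) + 1 := by omega
      rw [h2, List.range'_succ]
    rw [loopA]
    simp only [hTv, harr1]
    by_cases hC : nums.getD i 0 > nums.getD (i+1) 0
        ∨ (nums.getD i 0 = nums.getD (i+1) 0 ∧ hv = false)
    · rw [if_pos hC]
      have harr' : (List.replicate (i+1) true ++ (hv :: T')).set i false
          = List.replicate i true ++ bArr (nums.drop i) := by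
        rw [set_replicate_append, hbds, if_pos hC]
      rw [harr']
      have hpv : lmsP nums (i+1) = hv := by rw [hp, if_pos hC]; simp
      have hlms : (if hv = true then
            ((((List.range' (i+2) (nums.length - (i+1))).filter (lmsP nums)).reverse).map
              Int.ofNat) ++ [Int.ofNat (i+1)]
          else
            (((List.range' (i+2) (nums.length - (i+1))).filter (lmsP nums)).reverse).map
              Int.ofNat)
          = (((List.range' (i+1) (nums.length - i)).filter (lmsP nums)).reverse).map
              Int.ofNat := by
        rw [hrange, List.filter_cons, hpv]
        cases hv <;> simp
      rw [show i + 1 + 1 = i + 2 from rfl, hlms]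
      exact ih (le_of_lt hilt)
    · rw [if_neg hC]
      have harr' : List.replicate (i+1) true ++ (hv :: T')
          = List.replicate i true ++ bArr (nums.drop i) := by
        rw [hbds, if_neg hC, List.replicate_succ']
        simp
      rw [harr']
      have hpv : lmsP nums (i+1) = false := by rw [hp, if_neg hC]; simp
      have hlms : (List.range' (i+2) (nums.length - (i+1))).filter (lmsP nums)
          = (List.range' (i+1) (nums.length - i)).filter (lmsP nums) := by
        rw [hrange, List.filter_cons, hpv]; simp
      rw [show i + 1 + 1 = i + 2 from rfl, hlms]
      exact ih (le_of_lt hilt)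

-- ===== VERDICT (by name: the statement is the Claim_ definition above) =====
theorem buildLSArrayAndLMS_spec : Claim_equal_buildLSArrayAndLMS := by
  intro nums _
  have h := loopA_inv nums nums.length (le_refl _)
  have h0 : nums.getD nums.length 0 = 0 := by
    simp [List.getD]
  have h1 : List.replicate nums.length true ++ bArr (nums.drop nums.length)
      = List.replicate (nums.length + 1) true := by
    rw [List.drop_length, List.replicate_succ']
    rfl
  have h2 : nums.length - nums.length = 0 := by omega
  rw [h0, h1, h2] at h
  simp only [List.range'_zero, List.filter_nil, List.reverse_nil, List.map_nil] at h
  show buildLSArrayAndLMS nums = buildLSArrayAndLMS_alt nums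
  rw [buildLSArrayAndLMS, h, buildLSArrayAndLMS_alt]
  rfl
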